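-- pv_equiv track=rewrite | github.com/NorphyOG/plugin-pySys | src/mmst/plugins/media_library/shelves.py | validate_shelf_order
-- ===== SOURCE A (Python) =====
-- from typing import Any, Dict, List, Tuple, Optional, Callable
--
-- def validate_shelf_order(order: List[str]) -> List[str]:
--     allowed = {"recent", "top_rated"}
--     seen: List[str] = []
--     for sid in order:
--         if sid in allowed and sid not in seen:
--             seen.append(sid)
--     for sid in ["recent", "top_rated"]:
--         if sid not in seen:
--             seen.append(sid)
--     return seen
-- ===== SOURCE B (Python) =====
-- def validate_shelf_order(order):
--     first = {}
--     for i, sid in enumerate(order):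
--         if sid in ("recent", "top_rated") and sid not in first:
--             first[sid] = i
--     n = len(order)
--     return sorted(["recent", "top_rated"], key=lambda s: first.get(s, n))
-- ===== Notes on version B (the rewrite author's own statement) =====
-- stated objective: alternative
-- what changed: Replaces A's two append loops (scan-and-collect then fill in missing ids) with one pass recording the first index of each allowed id in a dict, followed by a stable sort of the canonical id list keyed by first index with len(order) as a missing sentinel.
import Mathlib
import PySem

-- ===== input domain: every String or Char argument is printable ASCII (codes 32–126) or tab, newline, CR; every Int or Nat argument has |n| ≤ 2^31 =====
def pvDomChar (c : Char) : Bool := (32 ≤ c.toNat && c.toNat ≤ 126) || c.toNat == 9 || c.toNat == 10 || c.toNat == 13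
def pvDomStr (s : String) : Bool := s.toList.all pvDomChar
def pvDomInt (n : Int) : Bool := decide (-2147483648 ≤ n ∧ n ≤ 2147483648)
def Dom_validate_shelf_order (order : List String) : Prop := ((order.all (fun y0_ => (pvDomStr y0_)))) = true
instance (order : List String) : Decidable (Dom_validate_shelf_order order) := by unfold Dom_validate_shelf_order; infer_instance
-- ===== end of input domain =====

-- B replaces A's two append loops with a single first-index-recording pass plus a stable
-- sort of the canonical id list; equivalence of the two is proved below.

-- ===== PORT A =====
-- first loop of A: collect allowed ids in order of first appearance
def pvLoopA (xs : List String) (seen : List String) : List String :=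
  match xs with
  | [] => seen
  | sid :: rest =>
    if (sid == "recent" || sid == "top_rated") && !(seen.contains sid) then
      pvLoopA rest (seen ++ [sid])
    else
      pvLoopA rest seen

-- second loop of A: append the still-missing ids in canonical order
def pvLoopA2 (ids : List String) (seen : List String) : List String :=
  match ids with
  | [] => seen
  | sid :: rest =>
    if !(seen.contains sid) then pvLoopA2 rest (seen ++ [sid])
    else pvLoopA2 rest seen

def validate_shelf_order (order : List String) : List String :=
  pvLoopA2 ["recent", "top_rated"] (pvLoopA order [])

-- ===== PORT B =====
-- B's loop: for i, sid in enumerate(order): record first index of each allowed id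
def pvBuildFirst (i : Int) (xs : List String) (d : PySem.Dict String Int) : PySem.Dict String Int :=
  match xs with
  | [] => d
  | sid :: rest =>
    if (sid == "recent" || sid == "top_rated") && (d.get? sid).isNone then
      pvBuildFirst (i + 1) rest (d.insert sid i)
    else
      pvBuildFirst (i + 1) rest d

def validate_shelf_order_alt (order : List String) : List String :=
  let first := pvBuildFirst 0 order PySem.Dict.empty
  let n : Int := (order.length : Int)
  PySem.List.sorted ["recent", "top_rated"] (fun s => first.getD s n) false

-- ===== PRECONDITION & SPEC =====
def Spec_validate_shelf_order (order : List String) (out : List String) : Prop := out = validate_shelf_order_alt order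
instance (order : List String) (out : List String) : Decidable (Spec_validate_shelf_order order out) := by unfold Spec_validate_shelf_order; infer_instance

-- ===== CLAIM (what is proved, stated in full; the proofs are below) =====
def Claim_equal_validate_shelf_order : Prop := ∀ (order : List String), Dom_validate_shelf_order order → Spec_validate_shelf_order order (validate_shelf_order order)

-- ===== LEMMAS AND PROOFS =====

-- "top_rated" appears strictly before any "recent" in xs
def pvTopFirst (xs : List String) : Bool :=
  match xs with
  | [] => false
  | x :: rest => if x == "top_rated" then true else if x == "recent" then false else pvTopFirst rest

-- A-side characterization ------------------------------------------------
lemma pvLoopA_absorb (xs : List String) (seen : List String)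
    (hr : seen.contains "recent" = true) (ht : seen.contains "top_rated" = true) :
    pvLoopA xs seen = seen := by
  have hr' : "recent" ∈ seen := by simpa using hr
  have ht' : "top_rated" ∈ seen := by simpa using ht
  induction xs with
  | nil => rfl
  | cons x rest ih =>
    simp only [pvLoopA]
    by_cases h1 : x = "recent"
    · simp [h1, hr', ih]
    · by_cases h2 : x = "top_rated"
      · simp [h2, ht', ih]
      · simp [h1, h2, ih]

lemma pvFullA_r (xs : List String) :
    pvLoopA2 ["recent", "top_rated"] (pvLoopA xs ["recent"]) = ["recent", "top_rated"] := by
  induction xs with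
  | nil => rfl
  | cons x rest ih =>
    simp only [pvLoopA]
    by_cases h1 : x = "recent"
    · simpa [h1] using ih
    · by_cases h2 : x = "top_rated"
      · rw [if_pos (by simp [h2])]
        rw [pvLoopA_absorb rest _ (by simp [h2]) (by simp [h2])]
        simp [h2, pvLoopA2]
      · simpa [h1, h2] using ih

lemma pvFullA_t (xs : List String) :
    pvLoopA2 ["recent", "top_rated"] (pvLoopA xs ["top_rated"]) = ["top_rated", "recent"] := by
  induction xs with
  | nil => rfl
  | cons x rest ih =>
    simp only [pvLoopA]
    by_cases h1 : x = "top_rated"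
    · simpa [h1] using ih
    · by_cases h2 : x = "recent"
      · rw [if_pos (by simp [h2])]
        rw [pvLoopA_absorb rest _ (by simp [h2]) (by simp [h2])]
        simp [h2, pvLoopA2]
      · simpa [h1, h2] using ih

lemma pvA_char (order : List String) :
    validate_shelf_order order =
      if pvTopFirst order then ["top_rated", "recent"] else ["recent", "top_rated"] := by
  induction order with
  | nil => rfl
  | cons x rest ih =>
    simp only [validate_shelf_order, pvLoopA, pvTopFirst]
    by_cases h2 : x = "top_rated"
    · rw [if_pos (by simp [h2])]
      simpa [h2] using pvFullA_t rest
    · by_cases h1 : x = "recent"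
      · rw [if_pos (by simp [h1])]
        simpa [h1, h2] using pvFullA_r rest
      · simpa [h1, h2] using ih

-- B-side characterization ------------------------------------------------
lemma pvBuildFirst_preserve (xs : List String) (i : Int) (d : PySem.Dict String Int)
    (k : String) (v : Int) (h : d.get? k = some v) :
    (pvBuildFirst i xs d).get? k = some v := by
  induction xs generalizing i d with
  | nil => simpa [pvBuildFirst] using h
  | cons x rest ih =>
    simp only [pvBuildFirst]
    split_ifs with hc
    · apply ih
      rcases eq_or_ne k x with rfl | hne
      · simp [h] at hc
      · rwa [PySem.Dict.get?_insert_of_ne _ _ hne]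
    · exact ih _ _ h

lemma pvBuildFirst_bound (xs : List String) (i : Int) (d : PySem.Dict String Int)
    (k : String) (h : d.get? k = none) :
    (pvBuildFirst i xs d).get? k = none ∨
      ∃ v, (pvBuildFirst i xs d).get? k = some v ∧ i ≤ v := by
  induction xs generalizing i d with
  | nil => left; simpa [pvBuildFirst] using h
  | cons x rest ih =>
    simp only [pvBuildFirst]
    split_ifs with hc
    · rcases eq_or_ne k x with rfl | hne
      · right
        exact ⟨i, pvBuildFirst_preserve _ _ _ _ _ (PySem.Dict.get?_insert_self _ _ _), le_refl i⟩
      · rcases ih (i + 1) (d.insert x i) (by rwa [PySem.Dict.get?_insert_of_ne _ _ hne]) with h0 | ⟨v, hv, hle⟩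
        · exact Or.inl h0
        · exact Or.inr ⟨v, hv, by omega⟩
    · rcases ih (i + 1) d h with h0 | ⟨v, hv, hle⟩
      · exact Or.inl h0
      · exact Or.inr ⟨v, hv, by omega⟩

lemma pvBuildFirst_key_lt (xs : List String) (i L : Int) (hL : i + (xs.length : Int) ≤ L) :
    ((pvBuildFirst i xs PySem.Dict.empty).getD "top_rated" L <
      (pvBuildFirst i xs PySem.Dict.empty).getD "recent" L) ↔ pvTopFirst xs = true := by
  induction xs generalizing i with
  | nil => simp [pvBuildFirst, pvTopFirst, PySem.Dict.getD_empty]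
  | cons x rest ih =>
    by_cases h2 : x = "top_rated"
    · have hd : pvBuildFirst i (x :: rest) PySem.Dict.empty
          = pvBuildFirst (i + 1) rest (PySem.Dict.empty.insert "top_rated" i) := by
        simp [pvBuildFirst, h2, PySem.Dict.get?_empty]
      rw [hd]
      have ht := pvBuildFirst_preserve rest (i + 1)
        (PySem.Dict.empty.insert "top_rated" i) "top_rated" i
        (PySem.Dict.get?_insert_self _ _ _)
      have hr := pvBuildFirst_bound rest (i + 1) (PySem.Dict.empty.insert "top_rated" i) "recent"
        (by rw [PySem.Dict.get?_insert_of_ne _ _ (by decide)]; simp [PySem.Dict.get?_empty])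
      rw [PySem.Dict.getD_of_get?_eq_some _ _ ht]
      simp only [pvTopFirst, h2]
      rcases hr with h0 | ⟨v, hv, hle⟩
      · rw [PySem.Dict.getD_of_get?_eq_none _ _ h0]
        simp at hL ⊢
        omega
      · rw [PySem.Dict.getD_of_get?_eq_some _ _ hv]
        simp
        omega
    · by_cases h1 : x = "recent"
      · have hd : pvBuildFirst i (x :: rest) PySem.Dict.empty
            = pvBuildFirst (i + 1) rest (PySem.Dict.empty.insert "recent" i) := by
          simp [pvBuildFirst, h1, PySem.Dict.get?_empty]
        rw [hd]
        have hrr := pvBuildFirst_preserve rest (i + 1)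
          (PySem.Dict.empty.insert "recent" i) "recent" i
          (PySem.Dict.get?_insert_self _ _ _)
        have htt := pvBuildFirst_bound rest (i + 1) (PySem.Dict.empty.insert "recent" i) "top_rated"
          (by rw [PySem.Dict.get?_insert_of_ne _ _ (by decide)]; simp [PySem.Dict.get?_empty])
        rw [PySem.Dict.getD_of_get?_eq_some _ _ hrr]
        simp only [pvTopFirst, h1]
        rcases htt with h0 | ⟨v, hv, hle⟩
        · rw [PySem.Dict.getD_of_get?_eq_none _ _ h0]
          simp at hL ⊢
          omega
        · rw [PySem.Dict.getD_of_get?_eq_some _ _ hv]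
          simp
          omega
      · have hd : pvBuildFirst i (x :: rest) PySem.Dict.empty
            = pvBuildFirst (i + 1) rest PySem.Dict.empty := by
          simp [pvBuildFirst, h1, h2]
        rw [hd]
        simp only [pvTopFirst]
        rw [if_neg (by simp [h2]), if_neg (by simp [h1])]
        apply ih
        simp at hL ⊢
        omega

lemma pvB_char (order : List String) :
    validate_shelf_order_alt order =
      if pvTopFirst order then ["top_rated", "recent"] else ["recent", "top_rated"] := by
  unfold validate_shelf_order_alt
  have hkey := pvBuildFirst_key_lt order 0 (order.length : Int) (by omega)
  set d := pvBuildFirst 0 order PySem.Dict.empty with hd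
  set n : Int := (order.length : Int) with hn
  by_cases h : pvTopFirst order = true
  · rw [if_pos h]
    have hlt : d.getD "top_rated" n < d.getD "recent" n := hkey.mpr h
    apply PySem.List.sorted_eq_of_perm_of_pairwise_lt (ys := ["top_rated", "recent"])
    · exact List.Perm.swap _ _ _
    · refine List.Pairwise.cons ?_ (List.pairwise_singleton _ _)
      intro b hb
      rw [List.mem_singleton] at hb
      subst hb
      exact hlt
  · rw [if_neg h]
    have hle : d.getD "recent" n ≤ d.getD "top_rated" n :=
      le_of_not_gt (fun hl => h (hkey.mp hl))
    apply PySem.List.sorted_eq_self_of_pairwise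
    refine List.Pairwise.cons ?_ (List.pairwise_singleton _ _)
    intro b hb
    rw [List.mem_singleton] at hb
    subst hb
    exact hle

-- ===== VERDICT (by name: the statement is the Claim_ definition above) =====
theorem validate_shelf_order_spec : Claim_equal_validate_shelf_order := by
  intro order _
  unfold Spec_validate_shelf_order
  rw [pvA_char, pvB_char]
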